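-- pv_equiv track=rewrite | github.com/nec-research/OpenIE_LFP | lfp_utils.py | tup_match_list
-- ===== SOURCE A (Python) =====
-- def tup_match(old_name, old_pos, en2tar):
--
--     ''' matching tuples with (name, pos) = (old name, old pos) into new tuples.'''
--
--     start, end = old_pos[0], old_pos[1]
--     src_seq = [j for j in range(start, end+1)]
--     tar_seq = []
--     old_name_splited = old_name.split(' ')
--     while '' in old_name_splited:
--         old_name_splited.remove('')
--     new_name = []
--
--     for i, j in enumerate(src_seq):
--         if j in en2tar:
--             tar_seq.append(en2tar[j])
--             new_name.append((old_name_splited[i], en2tar[j]))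
--
--     new_name = sorted(new_name, key=lambda x: x[1])
--
--     tar_name = ' '.join([n[0].replace('<sep>', ' ') for n in new_name])
--     tar_seq.sort()
--
--     return tar_name, tar_seq
--
-- def tup_match_list(old_names, old_poss, en2tar):
--
--     ''' call tup_match() for each element in a list.
--     Basically used for <args> key-value pair in original data.'''
--
--     assert len(old_names) == len(old_poss)
--     names = []
--     locs = []
--     for i, old_name in enumerate(old_names):
--         name, loc = tup_match(old_name, old_poss[i], en2tar)
--         names.append(name)
--         locs.append(loc)
--     return names, locs
-- ===== SOURCE B (Python) =====
-- def tup_match_list(old_names, old_poss, en2tar):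
--     assert len(old_names) == len(old_poss)
--     mapping = dict(en2tar)
--     names, locs = [], []
--     for name, pos in zip(old_names, old_poss):
--         toks = [t for t in name.split(' ') if t]
--         disp, tars = [], []
--         for i, j in enumerate(range(pos[0], pos[1] + 1)):
--             if j in mapping:
--                 t = mapping[j]
--                 tok = toks[i]
--                 idx = 0
--                 while idx < len(tars) and tars[idx] <= t:
--                     idx += 1
--                 tars.insert(idx, t)
--                 disp.insert(idx, tok.replace('<sep>', ' '))
--         names.append(' '.join(disp))
--         locs.append(tars)
--     return names, locs
-- ===== Notes on version B (the rewrite author's own statement) =====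
-- stated objective: alternative
-- what changed: B never calls sort: it maintains the output incrementally in one pass, inserting each matched target (and its already-<sep>-replaced token) into the correct position of two parallel ordered lists via an online stable insertion (after equal keys), where A collects everything first and then runs two independent offline sorts.
import Mathlib
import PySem

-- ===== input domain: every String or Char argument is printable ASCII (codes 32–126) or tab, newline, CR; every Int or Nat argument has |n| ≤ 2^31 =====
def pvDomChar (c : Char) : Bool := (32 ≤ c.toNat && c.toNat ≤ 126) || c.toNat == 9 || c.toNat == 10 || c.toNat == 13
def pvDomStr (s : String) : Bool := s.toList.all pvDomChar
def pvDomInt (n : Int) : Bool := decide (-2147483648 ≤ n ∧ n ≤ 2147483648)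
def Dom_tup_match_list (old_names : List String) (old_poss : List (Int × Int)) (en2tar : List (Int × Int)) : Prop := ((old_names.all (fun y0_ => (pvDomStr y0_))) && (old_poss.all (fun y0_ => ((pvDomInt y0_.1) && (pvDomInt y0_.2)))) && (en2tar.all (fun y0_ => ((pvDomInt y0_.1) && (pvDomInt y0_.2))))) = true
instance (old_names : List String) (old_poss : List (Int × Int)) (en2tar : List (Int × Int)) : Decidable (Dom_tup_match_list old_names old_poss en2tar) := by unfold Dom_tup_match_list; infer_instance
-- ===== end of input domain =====

-- B drops A's two offline sorts entirely: it inserts each matched target (and its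
-- already-<sep>-replaced token) into the right place of two parallel ordered lists
-- as soon as it is found (online stable insertion after equal keys); objective:
-- alternative. Return-value equivalence only (A mutates no argument).

-- ===== PORT A =====
-- 'while "" in lst: lst.remove("")' of A, step for step (remove first '' until none left)
def pvRemoveAllEmpty (l : List String) : List String :=
  match h : PySem.List.remove? l "" with
  | some l' => pvRemoveAllEmpty l'
  | none => l
termination_by l.length
decreasing_by
  have hm : "" ∈ l := by
    by_contra hn
    have h2 := (PySem.List.remove?_eq_none_iff (xs := l) (v := "")).mpr hn
    rw [h2] at h
    cases h
  rw [PySem.List.remove?_eq_some_erase l "" hm] at h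
  have hl : l' = l.erase "" := (Option.some.inj h).symm
  have := List.length_erase_of_mem hm
  have hpos : 0 < l.length := List.length_pos_of_mem hm
  simp [hl]
  omega

-- the body of A's 'for i, j in enumerate(src_seq)' loop (none = IndexError on old_name_splited[i])
def pvStepA (d : PySem.Dict Int Int) (toks : List String)
    (acc : Option (List Int × List (String × Int))) (ij : Int × Int) :
    Option (List Int × List (String × Int)) :=
  match acc with
  | none => none
  | some (tar_seq, new_name) =>
    if d.contains ij.2 then
      match PySem.List.pyGet? toks ij.1 with
      | none => none
      | some tok => some (tar_seq ++ [d.getD ij.2 0], new_name ++ [(tok, d.getD ij.2 0)])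
    else some (tar_seq, new_name)

-- tup_match of A (none = A raises IndexError there)
def pvTupMatchA (old_name : String) (old_pos : Int × Int) (en2tar : List (Int × Int)) :
    Option (String × List Int) :=
  let start := old_pos.1
  let stop := old_pos.2
  let src_seq := PySem.List.pyRange start (stop + 1) 1
  let old_name_splited := pvRemoveAllEmpty ((PySem.Str.split? old_name " ").getD [])
  let d := PySem.Dict.ofList en2tar
  match (PySem.List.enumerate src_seq 0).foldl (pvStepA d old_name_splited) (some ([], [])) with
  | none => none
  | some (tar_seq, new_name0) =>
    let new_name := PySem.List.sorted new_name0 (fun x => x.2) false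
    let tar_name := PySem.Str.join " " (new_name.map (fun n => PySem.Str.replace n.1 "<sep>" " "))
    some (tar_name, PySem.List.sorted tar_seq (fun x => x) false)

-- the body of A's 'for i, old_name in enumerate(old_names)' loop
def pvStepTop (old_poss : List (Int × Int)) (en2tar : List (Int × Int))
    (acc : Option (List String × List (List Int))) (ix : Int × String) :
    Option (List String × List (List Int)) :=
  match acc with
  | none => none
  | some (names, locs) =>
    match PySem.List.pyGet? old_poss ix.1 with
    | none => none
    | some pos =>
      match pvTupMatchA ix.2 pos en2tar with
      | none => none
      | some r => some (names ++ [r.1], locs ++ [r.2])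

def tup_match_list (old_names : List String) (old_poss : List (Int × Int)) (en2tar : List (Int × Int)) : List String × List (List Int) :=
  if old_names.length = old_poss.length then
    ((PySem.List.enumerate old_names 0).foldl (pvStepTop old_poss en2tar) (some ([], []))).getD ([], [])
  else ([], [])  -- assert fails: Python raises; Pre_ excludes this

-- ===== PORT B =====
-- B's 'while idx < len(tars) and tars[idx] <= t: idx += 1'
def pvFindIdx (tars : List Int) (t : Int) : Nat :=
  match tars with
  | [] => 0
  | x :: xs => if x ≤ t then pvFindIdx xs t + 1 else 0

-- the body of B's 'for i, j in enumerate(range(...))' loop (none = IndexError on toks[i])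
def pvStepB (d : PySem.Dict Int Int) (toks : List String)
    (acc : Option (List String × List Int)) (ij : Int × Int) :
    Option (List String × List Int) :=
  match acc with
  | none => none
  | some (disp, tars) =>
    match d.get? ij.2 with
    | none => some (disp, tars)
    | some t =>
      match PySem.List.pyGet? toks ij.1 with
      | none => none
      | some tok =>
        let idx := pvFindIdx tars t
        some (PySem.List.insert disp (idx : Int) (PySem.Str.replace tok "<sep>" " "),
              PySem.List.insert tars (idx : Int) t)

-- one element of B's outer loop
def pvTupMatchB (d : PySem.Dict Int Int) (name : String) (pos : Int × Int) :
    Option (String × List Int) :=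
  let toks := ((PySem.Str.split? name " ").getD []).filter (fun t => t ≠ "")
  match (PySem.List.enumerate (PySem.List.pyRange pos.1 (pos.2 + 1) 1) 0).foldl
      (pvStepB d toks) (some ([], [])) with
  | none => none
  | some (disp, tars) => some (PySem.Str.join " " disp, tars)

def pvStepTopB (d : PySem.Dict Int Int)
    (acc : Option (List String × List (List Int))) (np : String × (Int × Int)) :
    Option (List String × List (List Int)) :=
  match acc with
  | none => none
  | some (names, locs) =>
    match pvTupMatchB d np.1 np.2 with
    | none => none
    | some r => some (names ++ [r.1], locs ++ [r.2])

def tup_match_list_alt (old_names : List String) (old_poss : List (Int × Int)) (en2tar : List (Int × Int)) : List String × List (List Int) :=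
  if old_names.length = old_poss.length then
    let d := PySem.Dict.ofList en2tar
    (((old_names.zip old_poss).foldl (pvStepTopB d) (some ([], [])))).getD ([], [])
  else ([], [])

-- ===== PRECONDITION & SPEC =====
def pvTokens (name : String) : List String :=
  ((PySem.Str.split? name " ").getD []).filter (fun t => t ≠ "")

-- Pre_ excludes exactly the inputs where A raises: an AssertionError when the two
-- lists differ in length, or an IndexError in tup_match when some matched position's
-- index reaches past the space-split token list of its name.
def PreElt (en2tar : List (Int × Int)) (name : String) (pos : Int × Int) : Prop :=
  ∀ kv ∈ en2tar, pos.1 ≤ kv.1 → kv.1 ≤ pos.2 → (kv.1 - pos.1).toNat < (pvTokens name).length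

def Pre_tup_match_list (old_names : List String) (old_poss : List (Int × Int)) (en2tar : List (Int × Int)) : Prop :=
  old_names.length = old_poss.length ∧
  ∀ p ∈ old_names.zip old_poss, PreElt en2tar p.1 p.2

instance (old_names : List String) (old_poss : List (Int × Int)) (en2tar : List (Int × Int)) : Decidable (Pre_tup_match_list old_names old_poss en2tar) := by
  unfold Pre_tup_match_list PreElt; infer_instance

def pvWitness_tup_match_list : List String × (List (Int × Int)) × (List (Int × Int)) :=
  (["a b", "x"], [(0, 1), (5, 5)], [(0, 9), (1, 3), (5, 1)])

def Spec_tup_match_list (old_names : List String) (old_poss : List (Int × Int)) (en2tar : List (Int × Int)) (out : List String × List (List Int)) : Prop := out = tup_match_list_alt old_names old_poss en2tar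
instance (old_names : List String) (old_poss : List (Int × Int)) (en2tar : List (Int × Int)) (out : List String × List (List Int)) : Decidable (Spec_tup_match_list old_names old_poss en2tar out) := by unfold Spec_tup_match_list; infer_instance

-- ===== CLAIM (what is proved, stated in full; the proofs are below) =====
def Claim_equal_tup_match_list : Prop := ∀ (old_names : List String) (old_poss : List (Int × Int)) (en2tar : List (Int × Int)), Dom_tup_match_list old_names old_poss en2tar → Pre_tup_match_list old_names old_poss en2tar → Spec_tup_match_list old_names old_poss en2tar (tup_match_list old_names old_poss en2tar)

-- ===== LEMMAS AND PROOFS =====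
theorem pvRemoveAllEmpty_eq_filter (l : List String) :
    pvRemoveAllEmpty l = l.filter (fun s => s ≠ "") := by
  rw [pvRemoveAllEmpty]
  split
  case _ l' h =>
    have hm : "" ∈ l := by
      by_contra hn
      have h2 := (PySem.List.remove?_eq_none_iff (xs := l) (v := "")).mpr hn
      rw [h2] at h
      cases h
    rw [PySem.List.remove?_eq_some_erase l "" hm] at h
    have hl : l' = l.erase "" := (Option.some.inj h).symm
    subst hl
    rw [pvRemoveAllEmpty_eq_filter]
    obtain ⟨l₁, l₂, _, hsplit, herase⟩ := List.exists_erase_eq hm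
    rw [herase, hsplit]
    simp
  case _ h =>
    have hn : "" ∉ l := (PySem.List.remove?_eq_none_iff (xs := l) (v := "")).mp h
    symm
    apply List.filter_eq_self.mpr
    intro a ha
    simp only [ne_eq, decide_eq_true_eq]
    rintro rfl
    exact hn ha
termination_by l.length
decreasing_by
  have := List.length_erase_of_mem hm
  have hpos : 0 < l.length := List.length_pos_of_mem hm
  omega

theorem pv_get?_of_contains (d : PySem.Dict Int Int) (k : Int) (h : d.contains k = true) :
    d.get? k = some (d.getD k 0) := by
  rw [PySem.Dict.contains_eq_isSome_get?] at h
  obtain ⟨v, hv⟩ := Option.isSome_iff_exists.mp h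
  rw [hv]
  unfold PySem.Dict.getD
  rw [hv]
  rfl

theorem pv_get?_of_not_contains (d : PySem.Dict Int Int) (k : Int) (h : d.contains k = false) :
    d.get? k = none := by
  rw [PySem.Dict.contains_eq_isSome_get?] at h
  exact Option.not_isSome_iff_eq_none.mp (by simp [h])

-- the matched (token, target) pairs of one name, in position order
def pvMatches (d : PySem.Dict Int Int) (toks : List String) (js : List Int) : List (String × Int) :=
  (toks.zip js).filterMap (fun tp => (d.get? tp.2).map (fun tar => (tp.1, tar)))

theorem pv_loopA (d : PySem.Dict Int Int) (toks : List String) (js : List Int)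
    (k : Nat) (ts : List Int) (ns : List (String × Int))
    (h : ∀ idx : Nat, (hidx : idx < js.length) → d.contains js[idx] = true → k + idx < toks.length) :
    (PySem.List.enumerate js (k : Int)).foldl (pvStepA d toks) (some (ts, ns)) =
      some (ts ++ (pvMatches d (toks.drop k) js).map Prod.snd,
            ns ++ pvMatches d (toks.drop k) js) := by
  induction js generalizing k ts ns with
  | nil => simp [PySem.List.enumerate_nil, pvMatches]
  | cons j js ih =>
    rw [PySem.List.enumerate_cons, List.foldl_cons]
    have hcast : (k : Int) + 1 = ((k + 1 : Nat) : Int) := by push_cast; ring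
    by_cases hc : d.contains j = true
    · have hk : k < toks.length := by
        have := h 0 (by simp) (by simpa using hc)
        omega
      have hstep : pvStepA d toks (some (ts, ns)) ((k : Int), j) =
          some (ts ++ [d.getD j 0], ns ++ [(toks[k], d.getD j 0)]) := by
        simp only [pvStepA, hc, if_true]
        rw [PySem.List.pyGet?_natCast]
        simp [List.getElem?_eq_getElem hk]
      rw [hstep, hcast, ih (k + 1) _ _ (fun idx hidx hcon => by
        have := h (idx + 1) (by simpa using Nat.succ_lt_succ hidx) (by simpa using hcon)
        omega)]
      have hdrop : toks.drop k = toks[k] :: toks.drop (k + 1) :=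
        List.drop_eq_getElem_cons hk
      unfold pvMatches
      rw [hdrop]
      simp only [List.zip_cons_cons, List.filterMap_cons,
        pv_get?_of_contains d j hc, Option.map_some]
      simp
    · have hc' : d.contains j = false := by simpa using hc
      have hstep : pvStepA d toks (some (ts, ns)) ((k : Int), j) = some (ts, ns) := by
        simp [pvStepA, hc']
      rw [hstep, hcast, ih (k + 1) _ _ (fun idx hidx hcon => by
        have := h (idx + 1) (by simpa using Nat.succ_lt_succ hidx) (by simpa using hcon)
        omega)]
      have hget : d.get? j = none := pv_get?_of_not_contains d j hc'
      unfold pvMatches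
      rcases hd : toks.drop k with _ | ⟨c, rest⟩
      · have hd1 : toks.drop (k + 1) = [] := by
          have : toks.length ≤ k := by
            by_contra hlt
            rw [List.drop_eq_getElem_cons (by omega : k < toks.length)] at hd
            cases hd
          apply List.drop_eq_nil_of_le
          omega
        rw [hd1]
        simp
      · have hrest : rest = toks.drop (k + 1) := by
          have h3 : (toks.drop k).tail = toks.drop (k + 1) := List.tail_drop
          rw [hd] at h3
          simpa using h3
        rw [← hrest]
        simp [hget]

theorem pv_sorted_snd (P : List (String × Int)) :
    PySem.List.sorted (P.map Prod.snd) (fun x => x) false =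
      (PySem.List.sorted P (fun p => p.2) false).map Prod.snd := by
  apply PySem.List.sorted_id_eq_of_perm_of_pairwise
  · exact (PySem.List.sorted_perm P (fun p => p.2) false).map Prod.snd
  · exact List.Pairwise.map Prod.snd (fun a b h => h) (PySem.List.sorted_pairwise P (fun p => p.2))

theorem pvFindIdx_le (tars : List Int) (t : Int) : pvFindIdx tars t ≤ tars.length := by
  induction tars with
  | nil => simp [pvFindIdx]
  | cons x xs ih =>
    simp only [pvFindIdx, List.length_cons]
    split <;> omega

-- B's parallel insertion at pvFindIdx is the image of a stable insertBy on the pairs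
theorem pv_ins_map {β : Type} (g : String × Int → β) (P : List (String × Int)) (pr : String × Int) :
    PySem.List.insert (P.map g) ((pvFindIdx (P.map Prod.snd) pr.2 : Nat) : Int) (g pr) =
      (PySem.List.insertBy (fun a b => decide (a.2 < b.2)) pr P).map g := by
  induction P with
  | nil => simp [pvFindIdx, PySem.List.insertBy, PySem.List.insert_zero]
  | cons q P ih =>
    simp only [List.map_cons, pvFindIdx, PySem.List.insertBy]
    by_cases hle : q.2 ≤ pr.2
    · rw [if_pos hle, if_neg (by simp; omega : ¬ (decide (pr.2 < q.2) = true))]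
      have h1 : pvFindIdx (P.map Prod.snd) pr.2 ≤ (P.map g).length := by
        simpa using pvFindIdx_le (P.map Prod.snd) pr.2
      rw [PySem.List.insert_natCast _ _ _ (by simp at h1 ⊢; omega)]
      simp only [List.map_cons, ← ih]
      rw [PySem.List.insert_natCast _ _ _ h1]
      simp
    · rw [if_neg hle, if_pos (by simp; omega : decide (pr.2 < q.2) = true)]
      simp [PySem.List.insert_zero]

-- the inner loop of B computes the (mapped) running stable-insertion of the matches
theorem pv_loopB (d : PySem.Dict Int Int) (toks : List String) (js : List Int)
    (k : Nat) (P : List (String × Int))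
    (h : ∀ idx : Nat, (hidx : idx < js.length) → d.contains js[idx] = true → k + idx < toks.length) :
    (PySem.List.enumerate js (k : Int)).foldl (pvStepB d toks)
        (some (P.map (fun p => PySem.Str.replace p.1 "<sep>" " "), P.map Prod.snd)) =
      some (((pvMatches d (toks.drop k) js).foldl
              (fun acc pr => PySem.List.insertBy (fun a b => decide (a.2 < b.2)) pr acc) P).map
              (fun p => PySem.Str.replace p.1 "<sep>" " "),
            ((pvMatches d (toks.drop k) js).foldl
              (fun acc pr => PySem.List.insertBy (fun a b => decide (a.2 < b.2)) pr acc) P).map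
              Prod.snd) := by
  induction js generalizing k P with
  | nil => simp [PySem.List.enumerate_nil, pvMatches]
  | cons j js ih =>
    rw [PySem.List.enumerate_cons, List.foldl_cons]
    have hcast : (k : Int) + 1 = ((k + 1 : Nat) : Int) := by push_cast; ring
    by_cases hc : d.contains j = true
    · have hk : k < toks.length := by
        have := h 0 (by simp) (by simpa using hc)
        omega
      have hget := pv_get?_of_contains d j hc
      have hstep : pvStepB d toks
          (some (P.map (fun p => PySem.Str.replace p.1 "<sep>" " "), P.map Prod.snd)) ((k : Int), j) =
          some ((PySem.List.insertBy (fun a b => decide (a.2 < b.2)) (toks[k], d.getD j 0) P).map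
                  (fun p => PySem.Str.replace p.1 "<sep>" " "),
                (PySem.List.insertBy (fun a b => decide (a.2 < b.2)) (toks[k], d.getD j 0) P).map
                  Prod.snd) := by
        simp only [pvStepB, hget]
        rw [PySem.List.pyGet?_natCast]
        rw [List.getElem?_eq_getElem hk]
        simp only
        rw [show PySem.Str.replace toks[k] "<sep>" " " =
            (fun p : String × Int => PySem.Str.replace p.1 "<sep>" " ") (toks[k], d.getD j 0) from rfl,
          pv_ins_map (fun p => PySem.Str.replace p.1 "<sep>" " ") P (toks[k], d.getD j 0),
          show (d.getD j 0 : Int) = (Prod.snd (toks[k], d.getD j 0) : Int) from rfl,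
          pv_ins_map Prod.snd P (toks[k], d.getD j 0)]
      rw [hstep, hcast, ih (k + 1) _ (fun idx hidx hcon => by
        have := h (idx + 1) (by simpa using Nat.succ_lt_succ hidx) (by simpa using hcon)
        omega)]
      have hdrop : toks.drop k = toks[k] :: toks.drop (k + 1) :=
        List.drop_eq_getElem_cons hk
      unfold pvMatches
      rw [hdrop]
      simp only [List.zip_cons_cons, List.filterMap_cons, hget, Option.map_some, List.foldl_cons]
    · have hc' : d.contains j = false := by simpa using hc
      have hget : d.get? j = none := pv_get?_of_not_contains d j hc'
      have hstep : pvStepB d toks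
          (some (P.map (fun p => PySem.Str.replace p.1 "<sep>" " "), P.map Prod.snd)) ((k : Int), j) =
          some (P.map (fun p => PySem.Str.replace p.1 "<sep>" " "), P.map Prod.snd) := by
        simp [pvStepB, hget]
      rw [hstep, hcast, ih (k + 1) _ (fun idx hidx hcon => by
        have := h (idx + 1) (by simpa using Nat.succ_lt_succ hidx) (by simpa using hcon)
        omega)]
      unfold pvMatches
      rcases hd : toks.drop k with _ | ⟨c, rest⟩
      · have hd1 : toks.drop (k + 1) = [] := by
          have : toks.length ≤ k := by
            by_contra hlt
            rw [List.drop_eq_getElem_cons (by omega : k < toks.length)] at hd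
            cases hd
          apply List.drop_eq_nil_of_le
          omega
        rw [hd1]
        simp
      · have hrest : rest = toks.drop (k + 1) := by
          have h3 : (toks.drop k).tail = toks.drop (k + 1) := List.tail_drop
          rw [hd] at h3
          simpa using h3
        rw [← hrest]
        simp [hget]

theorem pv_contains_ofList (en2tar : List (Int × Int)) (k : Int)
    (h : (PySem.Dict.ofList en2tar).contains k = true) : k ∈ en2tar.map Prod.fst := by
  rw [PySem.Dict.contains_iff_mem_keys] at h
  have hk : (PySem.Dict.ofList en2tar).keys =
      PySem.Set.update PySem.Dict.empty.keys (en2tar.map Prod.fst) :=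
    PySem.Dict.keys_foldl_insert_key (ν := Int) en2tar Prod.fst (fun _ p => p.2) PySem.Dict.empty
  rw [hk] at h
  rcases (PySem.Set.mem_update PySem.Dict.empty.keys (en2tar.map Prod.fst) k).mp h with h0 | h1
  · simp [PySem.Dict.keys_empty] at h0
  · exact h1

-- the Dom-side hypothesis both inner loops use, derived from PreElt
theorem pv_preElt_h (en2tar : List (Int × Int)) (name : String) (pos : Int × Int)
    (h : PreElt en2tar name pos) :
    ∀ idx : Nat, (hidx : idx < (PySem.List.pyRange pos.1 (pos.2 + 1) 1).length) →
      (PySem.Dict.ofList en2tar).contains (PySem.List.pyRange pos.1 (pos.2 + 1) 1)[idx] = true →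
      0 + idx < (pvTokens name).length := by
  intro idx hidx hcon
  have hlen : (PySem.List.pyRange pos.1 (pos.2 + 1) 1).length = (pos.2 + 1 - pos.1).toNat :=
    PySem.List.length_pyRange_one _ _
  have hel : (PySem.List.pyRange pos.1 (pos.2 + 1) 1)[idx] = pos.1 + (idx : Int) :=
    PySem.List.getElem_pyRange_one _ _ _ hidx
  rw [hel] at hcon
  obtain ⟨kv, hmem, hfst⟩ := List.mem_map.mp (pv_contains_ofList en2tar _ hcon)
  rw [hlen] at hidx
  have h1 : pos.1 ≤ kv.1 := by omega
  have h2 : kv.1 ≤ pos.2 := by omega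
  have := h kv hmem h1 h2
  omega

theorem pvTupMatch_eq (en2tar : List (Int × Int)) (name : String) (pos : Int × Int)
    (h : PreElt en2tar name pos) :
    pvTupMatchA name pos en2tar = pvTupMatchB (PySem.Dict.ofList en2tar) name pos := by
  have hjs := pv_preElt_h en2tar name pos h
  have hA := pv_loopA (PySem.Dict.ofList en2tar) (pvTokens name)
    (PySem.List.pyRange pos.1 (pos.2 + 1) 1) 0 [] [] hjs
  have hB := pv_loopB (PySem.Dict.ofList en2tar) (pvTokens name)
    (PySem.List.pyRange pos.1 (pos.2 + 1) 1) 0 [] hjs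
  simp only [Nat.cast_zero, List.drop_zero, List.nil_append, List.map_nil] at hA hB
  simp only [pvTupMatchA, pvRemoveAllEmpty_eq_filter]
  rw [show ((PySem.Str.split? name " ").getD []).filter (fun s => s ≠ "") = pvTokens name from rfl]
  rw [hA]
  simp only [pvTupMatchB]
  rw [show ((PySem.Str.split? name " ").getD []).filter (fun t => t ≠ "") = pvTokens name from rfl]
  rw [hB]
  simp only
  rw [pv_sorted_snd]
  rw [PySem.List.sorted_eq_foldl_insertBy]

theorem pv_loopTop (en2tar : List (Int × Int)) (old_poss : List (Int × Int))
    (ns : List String) (k : Nat) (names : List String) (locs : List (List Int))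
    (hk : k + ns.length ≤ old_poss.length)
    (h : ∀ p ∈ ns.zip (old_poss.drop k), PreElt en2tar p.1 p.2) :
    (PySem.List.enumerate ns (k : Int)).foldl (pvStepTop old_poss en2tar) (some (names, locs)) =
      (ns.zip (old_poss.drop k)).foldl (pvStepTopB (PySem.Dict.ofList en2tar)) (some (names, locs)) := by
  induction ns generalizing k names locs with
  | nil => simp [PySem.List.enumerate_nil]
  | cons nm ns ih =>
    rw [PySem.List.enumerate_cons, List.foldl_cons]
    have hklt : k < old_poss.length := by simp at hk; omega
    have hdrop : old_poss.drop k = old_poss[k] :: old_poss.drop (k + 1) :=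
      List.drop_eq_getElem_cons hklt
    have hpre : PreElt en2tar nm old_poss[k] := by
      apply h (nm, old_poss[k])
      rw [hdrop, List.zip_cons_cons]
      exact List.mem_cons_self
    have hstepA : pvStepTop old_poss en2tar (some (names, locs)) ((k : Int), nm) =
        pvStepTopB (PySem.Dict.ofList en2tar) (some (names, locs)) (nm, old_poss[k]) := by
      simp only [pvStepTop, pvStepTopB]
      rw [PySem.List.pyGet?_natCast]
      rw [List.getElem?_eq_getElem hklt]
      simp only
      rw [pvTupMatch_eq en2tar nm old_poss[k] hpre]
    have hcast : (k : Int) + 1 = ((k + 1 : Nat) : Int) := by push_cast; ring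
    rw [hstepA, hdrop, List.zip_cons_cons, List.foldl_cons]
    rcases hr : pvStepTopB (PySem.Dict.ofList en2tar) (some (names, locs)) (nm, old_poss[k]) with _ | ⟨names', locs'⟩
    · have : ∀ s, s = none → ∀ l : List (String × (Int × Int)),
          l.foldl (pvStepTopB (PySem.Dict.ofList en2tar)) s = none := by
        rintro s rfl l
        induction l with
        | nil => rfl
        | cons p l ihl => simpa [pvStepTopB] using ihl
      rw [this _ rfl]
      have : ∀ (l : List (Int × String)), l.foldl (pvStepTop old_poss en2tar) none = none := by
        intro l
        induction l with
        | nil => rfl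
        | cons p l ihl => simpa [pvStepTop] using ihl
      rw [this]
    · rw [hcast, ih (k + 1) _ _ (by simp at hk ⊢; omega) (fun p hp => by
        apply h p
        rw [hdrop]
        exact List.mem_cons_of_mem _ (by simpa using hp))]

-- ===== VERDICT (by name: the statement is the Claim_ definition above) =====
theorem tup_match_list_spec : Claim_equal_tup_match_list := by
  intro old_names old_poss en2tar _ hpre
  obtain ⟨hlen, hall⟩ := hpre
  unfold Spec_tup_match_list tup_match_list tup_match_list_alt
  rw [if_pos hlen, if_pos hlen]
  have h0 := pv_loopTop en2tar old_poss old_names 0 [] [] (by omega) (by simpa using hall)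
  simp only [Nat.cast_zero, List.drop_zero] at h0
  rw [h0]
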